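-- pv_equiv track=rewrite | github.com/scheeseman486/grabia | collection_sync.py | _matches_tag_group
-- ===== SOURCE A (Python) =====
-- def _matches_tag_group(file_tags, tag_list):
--     """Check if a file's tags match any tag in a group.
--
--     Supports both exact matches and parent-tag matching:
--     - "beta" matches the tag "beta" directly
--     - "region" matches any tag starting with "region:" (parent match)
--     - "region:japan" matches "region:japan" exactly
--     """
--     for tag in tag_list:
--         if tag in file_tags:
--             return True
--         # Check if this is a parent tag (matches any child)
--         prefix = tag + ":"
--         if any(ft.startswith(prefix) for ft in file_tags):
--             return True
--     return False
-- ===== SOURCE B (Python) =====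
-- def _matches_tag_group(file_tags, tag_list):
--     """Check if a file's tags match any tag in a group (exact or parent match)."""
--     tag_set = set(tag_list)
--     for ft in file_tags:
--         if ft in tag_set:
--             return True
--         for i, ch in enumerate(ft):
--             if ch == ':' and ft[:i] in tag_set:
--                 return True
--     return False
-- ===== Notes on version B (the rewrite author's own statement) =====
-- stated objective: idiomatic
-- what changed: Inverts the scan: instead of looping over tag_list and testing each tag against every file tag (quadratic string prefix tests), B builds a set of tags once and loops over file_tags, checking the full tag and each colon-cut ancestor prefix against the set.
import Mathlib
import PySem

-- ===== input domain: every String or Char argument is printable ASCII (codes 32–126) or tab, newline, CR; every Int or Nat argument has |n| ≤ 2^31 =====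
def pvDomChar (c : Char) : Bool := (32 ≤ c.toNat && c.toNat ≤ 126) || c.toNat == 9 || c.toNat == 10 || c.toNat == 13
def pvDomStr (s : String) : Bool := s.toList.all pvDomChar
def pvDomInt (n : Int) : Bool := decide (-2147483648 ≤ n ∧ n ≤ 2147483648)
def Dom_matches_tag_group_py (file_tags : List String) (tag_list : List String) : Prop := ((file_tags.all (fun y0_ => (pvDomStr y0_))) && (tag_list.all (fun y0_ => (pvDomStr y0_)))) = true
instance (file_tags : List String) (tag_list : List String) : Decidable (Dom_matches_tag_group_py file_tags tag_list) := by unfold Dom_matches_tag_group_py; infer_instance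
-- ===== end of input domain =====

-- B re-implements the tag-group match by looping over file_tags against a set of the
-- group's tags (checking each colon-cut ancestor prefix), instead of A's tag-driven scan.

-- ===== PORT A =====
-- for tag in tag_list: if tag in file_tags: return True; if any(ft.startswith(tag+":") ...): return True
def pvGoA (file_tags : List String) : List String → Bool
  | [] => false
  | tag :: rest =>
    if file_tags.contains tag then true
    else if file_tags.any (fun ft => PySem.Str.startswith ft (tag ++ ":")) then true
    else pvGoA file_tags rest

def matches_tag_group_py (file_tags : List String) (tag_list : List String) : Bool :=
  pvGoA file_tags tag_list

-- ===== PORT B =====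
-- for ft in file_tags: if ft in tag_set: return True; for i, ch in enumerate(ft): if ch == ':' and ft[:i] in tag_set: return True
-- ft[:i] with i the (nonnegative) enumerate index is exactly `take i.toNat` of ft's characters
def pvGoB (tagSet : PySem.Set String) : List String → Bool
  | [] => false
  | ft :: rest =>
    if PySem.Set.contains tagSet ft then true
    else if (PySem.List.enumerate ft.toList 0).any
        (fun p => p.2 == ':' && PySem.Set.contains tagSet (String.ofList (ft.toList.take p.1.toNat))) then true
    else pvGoB tagSet rest

def matches_tag_group_py_alt (file_tags : List String) (tag_list : List String) : Bool :=
  pvGoB (PySem.Set.ofList tag_list) file_tags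

-- ===== PRECONDITION & SPEC =====
def Spec_matches_tag_group_py (file_tags : List String) (tag_list : List String) (out : Bool) : Prop := out = matches_tag_group_py_alt file_tags tag_list
instance (file_tags : List String) (tag_list : List String) (out : Bool) : Decidable (Spec_matches_tag_group_py file_tags tag_list out) := by unfold Spec_matches_tag_group_py; infer_instance

-- ===== CLAIM (what is proved, stated in full; the proofs are below) =====
def Claim_equal_matches_tag_group_py : Prop := ∀ (file_tags : List String) (tag_list : List String), Dom_matches_tag_group_py file_tags tag_list → Spec_matches_tag_group_py file_tags tag_list (matches_tag_group_py file_tags tag_list)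

-- ===== LEMMAS AND PROOFS =====

-- an early-return step as a boolean disjunction
lemma pvIte_or (a b c : Bool) :
    (if a = true then true else if b = true then true else c) = ((a || b) || c) := by
  cases a <;> cases b <;> simp

-- A's early-return loop is an `any` over tag_list
lemma pvGoA_eq_any (fts : List String) (tl : List String) :
    pvGoA fts tl = tl.any (fun tag =>
      fts.contains tag || fts.any (fun ft => PySem.Str.startswith ft (tag ++ ":"))) := by
  induction tl with
  | nil => rfl
  | cons t r ih =>
    simp only [pvGoA, List.any_cons]
    rw [pvIte_or, ih]

-- B's early-return loop is an `any` over file_tags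
lemma pvGoB_eq_any (s : PySem.Set String) (fts : List String) :
    pvGoB s fts = fts.any (fun ft =>
      PySem.Set.contains s ft || (PySem.List.enumerate ft.toList 0).any
        (fun p => p.2 == ':' && PySem.Set.contains s (String.ofList (ft.toList.take p.1.toNat)))) := by
  induction fts with
  | nil => rfl
  | cons f r ih =>
    simp only [pvGoB, List.any_cons]
    rw [pvIte_or, ih]

-- the key string fact: t ++ ":" is a prefix of f iff some ':' in f cuts f exactly at t
lemma prefix_colon_iff (t f : List Char) :
    (t ++ [':']) <+: f ↔ ∃ k : Nat, k < f.length ∧ f[k]? = some ':' ∧ f.take k = t := by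
  constructor
  · rintro ⟨r, hr⟩
    refine ⟨t.length, ?_, ?_, ?_⟩
    · subst hr; simp
    · subst hr; simp
    · subst hr; simp
  · rintro ⟨k, hk, hc, ht⟩
    have h2 : f.take (k + 1) = t ++ [':'] := by
      rw [List.take_add_one, ht, hc]
      rfl
    exact h2 ▸ List.take_prefix _ _

-- ===== VERDICT (by name: the statement is the Claim_ definition above) =====
theorem matches_tag_group_py_spec : Claim_equal_matches_tag_group_py := by
  intro fts tl _
  show matches_tag_group_py fts tl = matches_tag_group_py_alt fts tl
  unfold matches_tag_group_py matches_tag_group_py_alt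
  rw [pvGoA_eq_any, pvGoB_eq_any, Bool.eq_iff_iff]
  simp only [List.any_eq_true, Bool.or_eq_true, List.contains_iff_mem,
    PySem.Set.contains, PySem.Set.mem_ofList, PySem.Str.startswith_eq,
    PySem.Chars.startswith_iff, PySem.List.mem_enumerate_iff, Bool.and_eq_true, beq_iff_eq]
  constructor
  · rintro ⟨tag, htag, hmem | ⟨ft, hft, hpre⟩⟩
    · exact ⟨tag, hmem, Or.inl htag⟩
    · refine ⟨ft, hft, Or.inr ?_⟩
      have : (tag.toList ++ [':']) <+: ft.toList := by simpa using hpre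
      obtain ⟨k, hk, hc, ht⟩ := (prefix_colon_iff _ _).1 this
      refine ⟨((k : Int), ft.toList[k]), ⟨k, hk, by simp⟩, ?_, ?_⟩
      · simpa [List.getElem?_eq_getElem hk] using hc
      · simp [ht]
        exact htag
  · rintro ⟨ft, hft, hmem | ⟨⟨i, c⟩, ⟨k, hk, hp⟩, hc, hset⟩⟩
    · exact ⟨ft, hmem, Or.inl hft⟩
    · obtain ⟨hi, hcv⟩ := Prod.mk.injEq .. ▸ hp
      refine ⟨String.ofList (ft.toList.take k), ?_, Or.inr ⟨ft, hft, ?_⟩⟩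
      · cases hp; simpa using hset
      · cases hp
        simp only at hc
        have hpre : (ft.toList.take k ++ [':']) <+: ft.toList :=
          (prefix_colon_iff _ _).2 ⟨k, hk, by simp [List.getElem?_eq_getElem hk, hc], rfl⟩
        simpa using hpre
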